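-- pv_equiv track=rewrite | github.com/zengzenghe/Git_NewsPlaceExtract | extractPlace/main_evaluate.py | get_code_score
-- ===== SOURCE A (Python) =====
-- from collections import OrderedDict
--
-- def dictSort(input_dict):
--     ret = dict()
--     for code, cnt in input_dict.items():
--         if cnt not in ret.keys():
--             lst = []
--             lst.append(code)
--             ret[cnt] = lst
--         else:
--             ret[cnt].append(code)
--     return sorted(ret.items(), key=lambda x: x[0], reverse=True)
--
-- def get_code_score(loc_dic, org_dic, loc_weight=1, org_weight=1):
--     dic = OrderedDict()
--     for score_codes in loc_dic:
--         score = score_codes[0] * loc_weight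
--         codes = score_codes[1]
--         for code in codes:
--             dic[code] = dic.get(code, 0) + score
--
--     for score_codes in org_dic:
--         score = score_codes[0] * org_weight
--         codes = score_codes[1]
--         for code in codes:
--             dic[code] = dic.get(code, 0) + score
--     ret = dictSort(dic)
--     return ret
-- ===== SOURCE B (Python) =====
-- def get_code_score(loc_dic, org_dic, loc_weight=1, org_weight=1):
--     dic = {}
--     for weight, entries in ((loc_weight, loc_dic), (org_weight, org_dic)):
--         for score, codes in entries:
--             for code in codes:
--                 dic[code] = dic.get(code, 0) + score * weight
--     out = []
--     for code, cnt in sorted(dic.items(), key=lambda x: x[1], reverse=True):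
--         if out and out[0][0] == cnt:
--             out[0][1].append(code)
--         else:
--             out.insert(0, (cnt, [code]))
--     return out[::-1]
-- ===== Notes on version B (the rewrite author's own statement) =====
-- stated objective: alternative
-- what changed: Replaces dictSort's hash-group-by-count-then-sort-keys with a sort-then-linear-group pass: items are stably sorted by score descending, then runs of equal scores are folded into (score, codes) groups in one scan; the two aggregation loops are merged into a single loop over (weight, dict) pairs.
import Mathlib
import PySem

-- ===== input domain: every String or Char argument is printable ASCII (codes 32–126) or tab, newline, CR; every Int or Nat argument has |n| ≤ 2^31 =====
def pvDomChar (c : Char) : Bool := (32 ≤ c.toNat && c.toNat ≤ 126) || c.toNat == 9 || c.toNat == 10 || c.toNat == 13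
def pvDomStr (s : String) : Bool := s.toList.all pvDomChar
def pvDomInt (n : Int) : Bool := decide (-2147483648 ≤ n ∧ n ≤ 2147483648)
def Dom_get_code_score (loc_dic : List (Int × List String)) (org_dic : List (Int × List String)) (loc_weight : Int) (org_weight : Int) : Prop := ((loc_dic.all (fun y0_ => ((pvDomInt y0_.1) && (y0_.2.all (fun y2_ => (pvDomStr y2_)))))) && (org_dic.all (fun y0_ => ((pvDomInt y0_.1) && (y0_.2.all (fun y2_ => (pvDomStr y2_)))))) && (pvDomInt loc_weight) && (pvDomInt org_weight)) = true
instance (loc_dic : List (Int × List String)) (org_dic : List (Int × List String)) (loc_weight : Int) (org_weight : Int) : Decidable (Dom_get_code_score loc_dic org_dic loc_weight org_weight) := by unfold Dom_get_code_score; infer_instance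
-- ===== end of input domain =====

-- B replaces A's hash-group-by-score-then-sort-keys (dictSort) with a stable sort of the
-- items by score descending followed by one linear grouping pass (alternative decomposition,
-- same asymptotic cost); the two aggregation loops are merged into one loop over weighted inputs.

-- ===== PORT A =====
-- helper: Python's dictSort (module-level helper of A)
def pvDictSort (input_dict : PySem.Dict String Int) : List (Int × List String) :=
  let ret := input_dict.items.foldl
    (fun (r : PySem.Dict Int (List String)) p =>
      if r.contains p.2 = false then r.insert p.2 [p.1]
      else r.insert p.2 (r.getD p.2 [] ++ [p.1]))
    PySem.Dict.empty
  PySem.List.sorted ret.items (fun x => x.1) true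

def get_code_score (loc_dic : List (Int × List String)) (org_dic : List (Int × List String)) (loc_weight : Int) (org_weight : Int) : List (Int × List String) :=
  let dic : PySem.Dict String Int :=
    loc_dic.foldl
      (fun d sc => sc.2.foldl (fun d code => d.insert code (d.getD code 0 + sc.1 * loc_weight)) d)
      PySem.Dict.empty
  let dic2 : PySem.Dict String Int :=
    org_dic.foldl
      (fun d sc => sc.2.foldl (fun d code => d.insert code (d.getD code 0 + sc.1 * org_weight)) d)
      dic
  pvDictSort dic2

-- ===== PORT B =====
-- helper: one step of B's linear grouping loop over the score-sorted items
-- (out.insert(0, ...) = cons; out[0][1].append(code) = replace the head group)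
def pvGroupStep (out : List (Int × List String)) (p : String × Int) : List (Int × List String) :=
  match out with
  | (c, cs) :: rest =>
      if c == p.2 then (c, cs ++ [p.1]) :: rest
      else (p.2, [p.1]) :: (c, cs) :: rest
  | [] => [(p.2, [p.1])]

def get_code_score_alt (loc_dic : List (Int × List String)) (org_dic : List (Int × List String)) (loc_weight : Int) (org_weight : Int) : List (Int × List String) :=
  let dic : PySem.Dict String Int :=
    [(loc_weight, loc_dic), (org_weight, org_dic)].foldl
      (fun d we => we.2.foldl
        (fun d sc => sc.2.foldl (fun d code => d.insert code (d.getD code 0 + sc.1 * we.1)) d) d)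
      PySem.Dict.empty
  ((PySem.List.sorted dic.items (fun x => x.2) true).foldl pvGroupStep []).reverse

-- ===== PRECONDITION & SPEC =====
def Spec_get_code_score (loc_dic : List (Int × List String)) (org_dic : List (Int × List String)) (loc_weight : Int) (org_weight : Int) (out : List (Int × List String)) : Prop := out = get_code_score_alt loc_dic org_dic loc_weight org_weight
instance (loc_dic : List (Int × List String)) (org_dic : List (Int × List String)) (loc_weight : Int) (org_weight : Int) (out : List (Int × List String)) : Decidable (Spec_get_code_score loc_dic org_dic loc_weight org_weight out) := by unfold Spec_get_code_score; infer_instance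

-- ===== CLAIM (what is proved, stated in full; the proofs are below) =====
def Claim_equal_get_code_score : Prop := ∀ (loc_dic : List (Int × List String)) (org_dic : List (Int × List String)) (loc_weight : Int) (org_weight : Int), Dom_get_code_score loc_dic org_dic loc_weight org_weight → Spec_get_code_score loc_dic org_dic loc_weight org_weight (get_code_score loc_dic org_dic loc_weight org_weight)

-- ===== LEMMAS AND PROOFS =====

-- the distinct scores of an items list, in first-appearance order
def pvScoresOf (l : List (String × Int)) : List Int := PySem.Set.ofList (l.map (fun q => q.2))

-- the (score, codes) rows for a given list of scores
def pvGroupsOf (l : List (String × Int)) (T : List Int) : List (Int × List String) :=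
  T.map (fun s => (s, (l.filter (fun q => q.2 == s)).map (fun q => q.1)))

lemma pvGroupsOf_congr (l l' : List (String × Int)) (T : List Int)
    (h : ∀ s ∈ T, l.filter (fun q => q.2 == s) = l'.filter (fun q => q.2 == s)) :
    pvGroupsOf l T = pvGroupsOf l' T := by
  unfold pvGroupsOf
  exact List.map_congr_left (fun s hs => by rw [h s hs])

-- A's if/else grouping step IS Dict.modify
lemma pvStep_eq_modify (r : PySem.Dict Int (List String)) (p : String × Int) :
    (if r.contains p.2 = false then r.insert p.2 [p.1]
     else r.insert p.2 (r.getD p.2 [] ++ [p.1]))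
    = r.modify p.2 [] (fun x => x ++ [p.1]) := by
  by_cases h : r.contains p.2 = false
  · simp [h, PySem.Dict.modify, PySem.Dict.getD_of_not_contains r ([] : List String) h]
  · simp [h, PySem.Dict.modify]

-- the grouping dict of A has exactly the canonical rows, in first-appearance score order
-- appending one element to a Set
lemma pvOfList_append {α : Type} [BEq α] (xs : List α) (x : α) :
    (PySem.Set.ofList (xs ++ [x]) : List α)
    = if (PySem.Set.ofList xs : List α).contains x then PySem.Set.ofList xs
      else PySem.Set.ofList xs ++ [x] := by
  rw [PySem.Set.ofList_append]
  simp [PySem.Set.update, PySem.Set.add]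

lemma pvItems_groupDict (l : List (String × Int)) :
    (l.foldl (fun r p => r.modify p.2 [] (fun x => x ++ [p.1])) PySem.Dict.empty).items
    = pvGroupsOf l (pvScoresOf l) := by
  have hnd : (l.foldl (fun r p => r.modify p.2 [] (fun x => x ++ [p.1])) PySem.Dict.empty).keys.Nodup :=
    PySem.Dict.nodup_keys_foldl_modify_key l (fun p => p.2) [] (fun _ p => fun x => x ++ [p.1])
      PySem.Dict.empty (by simp)
  have hkeys : (l.foldl (fun r p => r.modify p.2 [] (fun x => x ++ [p.1])) PySem.Dict.empty).keys
      = pvScoresOf l := by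
    rw [PySem.Dict.keys_foldl_modify_key l (fun p => p.2) [] (fun _ p => fun x => x ++ [p.1])]
    simp [pvScoresOf, PySem.Set.update_nil_left]
  have hgd : ∀ c, (l.foldl (fun r p => r.modify p.2 [] (fun x => x ++ [p.1])) PySem.Dict.empty).getD c []
      = (l.filter (fun q => q.2 == c)).map (fun q => q.1) := by
    intro c
    have h1 := PySem.Dict.getD_foldl_modify_append (l.map (fun p => (p.2, p.1)))
      (PySem.Dict.empty : PySem.Dict Int (List String)) c
    rw [List.foldl_map] at h1
    simpa [List.filter_map, Function.comp] using h1
  rw [PySem.Dict.items_eq_map_keys _ hnd [], hkeys]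
  unfold pvGroupsOf
  exact List.map_congr_left (fun s _ => by rw [hgd s])

-- Set.ofList of a weakly descending list is strictly descending
lemma pvSet_sublist {α : Type} [BEq α] (xs : List α) : (PySem.Set.ofList xs : List α).Sublist xs := by
  induction xs using List.reverseRecOn with
  | nil => simp [PySem.Set.ofList]
  | append_singleton xs x ih =>
    rw [pvOfList_append]
    split
    · exact ih.trans (List.sublist_append_left xs [x])
    · exact List.Sublist.append ih (List.Sublist.refl [x])

lemma pvSet_pairwise_gt (xs : List Int) (h : xs.Pairwise (fun a b => b ≤ a)) :
    (PySem.Set.ofList xs : List Int).Pairwise (fun a b => b < a) := by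
  have h1 : (PySem.Set.ofList xs : List Int).Pairwise (fun a b => b ≤ a) :=
    h.sublist (pvSet_sublist xs)
  have h2 : (PySem.Set.ofList xs : List Int).Pairwise (fun a b => a ≠ b) :=
    PySem.Set.nodup_ofList xs
  exact (List.Pairwise.and h2 h1).imp (fun hab => lt_of_le_of_ne hab.2 (Ne.symm hab.1))

-- two lists equal as sets have permuted Set.ofList
lemma pvSet_perm {α : Type} [BEq α] [LawfulBEq α] (xs ys : List α)
    (h : ∀ a, a ∈ xs ↔ a ∈ ys) :
    (PySem.Set.ofList xs : List α).Perm (PySem.Set.ofList ys) := by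
  apply (List.perm_ext_iff_of_nodup (PySem.Set.nodup_ofList xs) (PySem.Set.nodup_ofList ys)).mpr
  intro a
  rw [PySem.Set.mem_ofList, PySem.Set.mem_ofList]
  exact h a

-- in a strictly descending list, a lower bound that is a member is the last element
lemma pvGetLast_min (T : List Int) (h : T ≠ []) (hp : T.Pairwise (fun a b => b < a))
    (s : Int) (hs : s ∈ T) (hle : ∀ a ∈ T, s ≤ a) : T.getLast h = s := by
  rcases List.eq_nil_or_concat T with rfl | ⟨T', t, rfl⟩
  · exact absurd rfl h
  · simp only [List.concat_eq_append] at *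
    rw [List.getLast_append_singleton]
    rw [List.pairwise_append] at hp
    rcases List.mem_append.mp hs with h1 | h2
    · have hts : t < s := hp.2.2 s h1 t (List.mem_singleton_self t)
      have hst : s ≤ t := hle t (by simp)
      omega
    · exact (List.mem_singleton.mp h2).symm

-- STABILITY of the reverse sort: ties keep their original relative order
lemma pvFilter_insertBy_neg {α : Type} (b : α → α → Bool) (x : α) (acc : List α)
    (p : α → Bool) (hx : p x = false) :
    (PySem.List.insertBy b x acc).filter p = acc.filter p := by
  induction acc with
  | nil => simp [PySem.List.insertBy, hx]
  | cons y ys ih =>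
    simp only [PySem.List.insertBy]
    split
    · simp [hx]
    · simp only [List.filter_cons]
      rw [ih]

lemma pvFilter_insertBy_pos {α : Type} (key : α → Int) (x : α) (acc : List α) (s : Int)
    (hx : key x = s) (h : acc.Pairwise (fun a b => key b ≤ key a)) :
    (PySem.List.insertBy (fun a b => decide (key b < key a)) x acc).filter (fun y => key y == s)
    = acc.filter (fun y => key y == s) ++ [x] := by
  induction acc with
  | nil => simp [PySem.List.insertBy, hx]
  | cons y ys ih =>
    rw [List.pairwise_cons] at h
    simp only [PySem.List.insertBy]
    split
    · -- key y < key x: everything in y :: ys has key < s, so its filter is empty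
      rename_i hlt
      simp only [decide_eq_true_eq] at hlt
      have hnil : (y :: ys).filter (fun y => key y == s) = [] := by
        rw [List.filter_eq_nil_iff]
        intro z hz
        have hzle : key z ≤ key y := by
          rcases hz with _ | hz
          · exact le_refl _
          · exact h.1 z (by assumption)
        simp only [beq_iff_eq]
        omega
      rw [hnil, List.filter_cons]
      simp [hx, hnil]
    · simp only [List.filter_cons]
      rw [ih h.2]
      split <;> simp

lemma pvSorted_filter_stable {α : Type} (l : List α) (key : α → Int) (s : Int) :
    (PySem.List.sorted l key true).filter (fun y => key y == s)
    = l.filter (fun y => key y == s) := by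
  induction l using List.reverseRecOn with
  | nil => simp [PySem.List.sorted]
  | append_singleton l x ih =>
    rw [PySem.List.sorted_rev_eq_foldl_insertBy, List.foldl_append, List.foldl_cons, List.foldl_nil,
      ← PySem.List.sorted_rev_eq_foldl_insertBy]
    by_cases hx : key x = s
    · rw [pvFilter_insertBy_pos key x _ s hx (PySem.List.sorted_pairwise_rev l key), ih,
        List.filter_append]
      simp [hx]
    · rw [pvFilter_insertBy_neg _ x _ _ (by simp [hx]), ih, List.filter_append]
      simp [hx]

-- the linear grouping pass on a weakly score-descending list produces the canonical rows reversed
lemma pvGroup_fold (u : List (String × Int)) (h : u.Pairwise (fun a b => b.2 ≤ a.2)) :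
    u.foldl pvGroupStep [] = (pvGroupsOf u (pvScoresOf u)).reverse := by
  induction u using List.reverseRecOn with
  | nil => simp [pvGroupsOf, pvScoresOf, PySem.Set.ofList]
  | append_singleton u p ih =>
    rw [List.pairwise_append] at h
    obtain ⟨hu, -, hcross⟩ := h
    have hall : ∀ q ∈ u, p.2 ≤ q.2 := fun q hq => hcross q hq p (List.mem_singleton_self p)
    rw [List.foldl_append, List.foldl_cons, List.foldl_nil, ih hu]
    have hSpair : (pvScoresOf u).Pairwise (fun a b => b < a) := by
      apply pvSet_pairwise_gt
      exact (List.pairwise_map).mpr (hu.imp (fun hab => hab))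
    have hSnd : (pvScoresOf u).Nodup := PySem.Set.nodup_ofList _
    have hscapp : pvScoresOf (u ++ [p])
        = if (pvScoresOf u).contains p.2 then pvScoresOf u else pvScoresOf u ++ [p.2] := by
      unfold pvScoresOf
      rw [List.map_append]
      exact pvOfList_append _ _
    have hGapp : ∀ (v : List (String × Int)) (T : List Int),
        pvGroupsOf v (T ++ [p.2])
        = pvGroupsOf v T ++ [(p.2, (v.filter (fun q => q.2 == p.2)).map (fun q => q.1))] := by
      intro v T; unfold pvGroupsOf; rw [List.map_append]; rfl
    by_cases hc : p.2 ∈ u.map (fun q => q.2)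
    · -- the last score repeats: the head group of the accumulator absorbs p
      have hmem : p.2 ∈ pvScoresOf u := (PySem.Set.mem_ofList _ _).mpr hc
      have hS : pvScoresOf (u ++ [p]) = pvScoresOf u := by
        rw [hscapp, if_pos]
        exact (List.contains_iff_mem).mpr hmem
      have hSne : pvScoresOf u ≠ [] := List.ne_nil_of_mem hmem
      have hlast : (pvScoresOf u).getLast hSne = p.2 := by
        apply pvGetLast_min _ hSne hSpair _ hmem
        intro a ha
        obtain ⟨q, hq, rfl⟩ := List.mem_map.mp ((PySem.Set.mem_ofList _ _).mp ha)
        exact hall q hq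
      have hdec : pvScoresOf u = (pvScoresOf u).dropLast ++ [p.2] := by
        conv_lhs => rw [← List.dropLast_append_getLast hSne]
        rw [hlast]
      have hnotin : p.2 ∉ (pvScoresOf u).dropLast := by
        have hn := hdec ▸ hSnd
        intro hmem'
        exact (List.nodup_append.mp hn).2.2 p.2 hmem' p.2 (List.mem_singleton_self _) rfl
      rw [hS, hdec, hGapp u, hGapp (u ++ [p])]
      have hcongr : pvGroupsOf (u ++ [p]) (pvScoresOf u).dropLast
          = pvGroupsOf u (pvScoresOf u).dropLast := by
        apply pvGroupsOf_congr
        intro s hs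
        have hne : p.2 ≠ s := fun he => hnotin (he ▸ hs)
        rw [List.filter_append]
        simp [hne]
      rw [hcongr]
      have hfp : (u ++ [p]).filter (fun q => q.2 == p.2) = u.filter (fun q => q.2 == p.2) ++ [p] := by
        rw [List.filter_append]; simp
      rw [hfp, List.map_append, List.reverse_append, List.reverse_append]
      simp [pvGroupStep]
    · -- a new, strictly smaller score: a fresh group is started
      have hnm : p.2 ∉ pvScoresOf u := fun hmem => hc ((PySem.Set.mem_ofList _ _).mp hmem)
      have hS : pvScoresOf (u ++ [p]) = pvScoresOf u ++ [p.2] := by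
        rw [hscapp, if_neg]
        simp only [List.contains_iff_mem]
        exact fun hmem => absurd hmem hnm
      have hfilter : u.filter (fun q => q.2 == p.2) = [] := by
        rw [List.filter_eq_nil_iff]
        intro q hq
        simp only [beq_iff_eq]
        exact fun he => hc (List.mem_map.mpr ⟨q, hq, he⟩)
      have hfp : (u ++ [p]).filter (fun q => q.2 == p.2) = [p] := by
        rw [List.filter_append, hfilter]; simp
      have hcongr : pvGroupsOf (u ++ [p]) (pvScoresOf u) = pvGroupsOf u (pvScoresOf u) := by
        apply pvGroupsOf_congr
        intro s hs
        have hne : p.2 ≠ s := fun he => hnm (he ▸ hs)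
        rw [List.filter_append]
        simp [hne]
      rw [hS, hGapp (u ++ [p]), hcongr, hfp]
      cases hrev : (pvGroupsOf u (pvScoresOf u)).reverse with
      | nil => simp [pvGroupStep, List.reverse_append, hrev]
      | cons hd tl =>
        have hdmem : hd ∈ pvGroupsOf u (pvScoresOf u) := by
          rw [← List.mem_reverse, hrev]; exact List.mem_cons_self
        have hd1 : hd.1 ≠ p.2 := by
          unfold pvGroupsOf at hdmem
          obtain ⟨s, hsS, hfs⟩ := List.mem_map.mp hdmem
          intro he
          exact hnm (he ▸ hfs ▸ hsS)
        rw [List.reverse_append, hrev]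
        obtain ⟨c, cs⟩ := hd
        simp only [] at hd1
        simp [pvGroupStep, hd1]

-- A side: sorting the grouped dict's items by score descending names the canonical result
lemma pvAside (l : List (String × Int)) :
    PySem.List.sorted
      (l.foldl (fun r p => r.modify p.2 [] (fun x => x ++ [p.1])) PySem.Dict.empty).items
      (fun x => x.1) true
    = pvGroupsOf l (PySem.List.sorted (pvScoresOf l) (fun x => x) true) := by
  rw [pvItems_groupDict]
  apply PySem.List.sorted_rev_eq_of_perm_of_pairwise_gt
  · exact List.Perm.map _ (PySem.List.sorted_perm (pvScoresOf l) (fun x => x) true)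
  · unfold pvGroupsOf
    rw [List.pairwise_map]
    have h1 := PySem.List.sorted_pairwise_rev (pvScoresOf l) (fun x => x)
    have h2 : (PySem.List.sorted (pvScoresOf l) (fun x => x) true).Nodup :=
      (PySem.List.sorted_perm (pvScoresOf l) (fun x => x) true).nodup_iff.mpr
        (PySem.Set.nodup_ofList _)
    exact (List.Pairwise.and h2 h1).imp (fun hab => lt_of_le_of_ne hab.2 (Ne.symm hab.1))

-- B side: sort-then-group also produces the canonical result
lemma pvBside (l : List (String × Int)) :
    ((PySem.List.sorted l (fun x => x.2) true).foldl pvGroupStep []).reverse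
    = pvGroupsOf l (PySem.List.sorted (pvScoresOf l) (fun x => x) true) := by
  rw [pvGroup_fold _ (by simpa using PySem.List.sorted_pairwise_rev l (fun x => x.2)),
      List.reverse_reverse]
  have hT : pvScoresOf (PySem.List.sorted l (fun x => x.2) true)
      = PySem.List.sorted (pvScoresOf l) (fun x => x) true := by
    symm
    apply PySem.List.sorted_rev_eq_of_perm_of_pairwise_gt
    · apply pvSet_perm
      intro a
      constructor
      · intro ha
        obtain ⟨q, hq, rfl⟩ := List.mem_map.mp ha
        exact List.mem_map.mpr ⟨q, (PySem.List.mem_sorted l (fun x => x.2) true q).mp hq, rfl⟩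
      · intro ha
        obtain ⟨q, hq, rfl⟩ := List.mem_map.mp ha
        exact List.mem_map.mpr ⟨q, (PySem.List.mem_sorted l (fun x => x.2) true q).mpr hq, rfl⟩
    · apply pvSet_pairwise_gt
      exact (List.pairwise_map).mpr
        ((PySem.List.sorted_pairwise_rev l (fun x => x.2)).imp (fun hab => hab))
  rw [hT]
  apply pvGroupsOf_congr
  intro s _
  exact pvSorted_filter_stable l (fun x => x.2) s

-- ===== VERDICT (by name: the statement is the Claim_ definition above) =====
theorem get_code_score_spec : Claim_equal_get_code_score := by
  intro loc_dic org_dic loc_weight org_weight _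
  unfold Spec_get_code_score get_code_score get_code_score_alt pvDictSort
  simp only [List.foldl]
  rw [show (fun (r : PySem.Dict Int (List String)) (p : String × Int) =>
        if r.contains p.2 = false then r.insert p.2 [p.1]
        else r.insert p.2 (r.getD p.2 [] ++ [p.1]))
      = (fun r p => r.modify p.2 [] (fun x => x ++ [p.1]))
    from funext fun r => funext fun p => pvStep_eq_modify r p]
  rw [pvAside, pvBside]
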